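-- pv_equiv track=rewrite | github.com/jorzel/codefights | arcade/core/stringConstruction.py | stringsConstruction
-- ===== SOURCE A (Python) =====
-- import copy
--
-- def stringsConstruction(a, b):
--     stack_b = list(b)
--     counter = 0
--     while True:
--         stack_a = list(a)
--         temp_b = copy.deepcopy(stack_b)
--         for s in temp_b:
--             if s in stack_a:
--                 stack_a.remove(s)
--                 stack_b.remove(s)
--             if len(stack_a) == 0:
--                 counter += 1
--                 break
--         if len(stack_a) > 0:
--             break
--
--     return counter
-- ===== SOURCE B (Python) =====
-- def stringsConstruction(a, b):
--     # For each distinct char a needs, b can supply count_b // count_a whole copies;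
--     # the answer is the smallest such quotient.
--     need = {}
--     for c in a:
--         need[c] = need.get(c, 0) + 1
--     have = {}
--     for c in b:
--         have[c] = have.get(c, 0) + 1
--     return min(have.get(c, 0) // n for c, n in need.items())
-- ===== Notes on version B (the rewrite author's own statement) =====
-- stated objective: faster
-- what changed: Replaces A's repeated rebuild-and-rescan simulation (rebuild list(a), scan a deep copy of the remaining b, list.remove inside the scan) with one counting pass over each string and a closed-form min over per-character quotients.
import Mathlib
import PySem

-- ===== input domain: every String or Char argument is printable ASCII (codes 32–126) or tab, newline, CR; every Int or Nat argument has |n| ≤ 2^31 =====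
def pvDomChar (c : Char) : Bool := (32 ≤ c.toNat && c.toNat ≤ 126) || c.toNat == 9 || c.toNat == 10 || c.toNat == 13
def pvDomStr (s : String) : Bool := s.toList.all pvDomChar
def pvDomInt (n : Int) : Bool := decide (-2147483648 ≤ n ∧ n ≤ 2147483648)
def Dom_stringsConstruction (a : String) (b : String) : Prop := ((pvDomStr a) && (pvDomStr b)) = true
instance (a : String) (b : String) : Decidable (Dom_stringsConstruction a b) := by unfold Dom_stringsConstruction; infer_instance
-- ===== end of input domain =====

-- B replaces A's repeated rebuild-and-rescan simulation with two counting passes and a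
-- closed-form min of per-character quotients (linear work instead of repeated rescans).

-- ===== PORT A =====
-- one pass of A's inner `for s in temp_b` loop over the snapshot tb, with the live
-- stacks sa (copies of a) and sb (remaining b) and the counter k; returns the final
-- (stack_a, stack_b, counter, broke-out-of-the-for flag).
-- list.remove(s) is List.erase: A removes from stack_a only after `s in stack_a`, and
-- the matching element is still present in stack_b (tb is a snapshot of sb), so the
-- ValueError branch of list.remove is unreachable and erase is exact there.
def passA : List Char → List Char → List Char → Int → (List Char × List Char × Int × Bool)
  | [], sa, sb, k => (sa, sb, k, false)
  | s :: rest, sa, sb, k =>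
    let sa' := if sa.contains s then sa.erase s else sa
    let sb' := if sa.contains s then sb.erase s else sb
    if sa'.isEmpty then (sa', sb', k + 1, true)
    else passA rest sa' sb' k

-- `while True`: each iteration that does not return removes |a| ≥ 1 chars from stack_b,
-- so when a ≠ "" the loop runs at most |b| + 1 times; the fuel only makes the recursion
-- structural and is never exhausted on inputs satisfying Pre_.
def loopA (al : List Char) : Nat → List Char → Int → Int
  | 0, _, k => k
  | fuel + 1, sb, k =>
    let r := passA sb al sb k
    if r.1.length > 0 then r.2.2.1 else loopA al fuel r.2.1 r.2.2.1

def stringsConstruction (a : String) (b : String) : Int :=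
  loopA a.toList (b.toList.length + 1) b.toList 0

-- ===== PORT B =====
def stringsConstruction_alt (a : String) (b : String) : Int :=
  let need := a.toList.foldl (fun d c => d.insert c (d.getD c 0 + 1)) (PySem.Dict.empty : PySem.Dict Char Int)
  let haveD := b.toList.foldl (fun d c => d.insert c (d.getD c 0 + 1)) (PySem.Dict.empty : PySem.Dict Char Int)
  -- Python's min(...) raises ValueError exactly when a = "" (empty generator); that
  -- input is outside Pre_, so the .getD default is never the returned value there.
  (PySem.List.min? (need.items.map (fun p => PySem.Int.floordiv (haveD.getD p.1 0) p.2)) (fun x => x)).getD 0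

-- ===== PRECONDITION & SPEC =====
-- Pre_ excludes exactly a = "": there A's while-loop never terminates (no value is
-- returned; B raises ValueError from min() on an empty generator).
def Pre_stringsConstruction (a : String) (b : String) : Prop := a ≠ ""
instance (a : String) (b : String) : Decidable (Pre_stringsConstruction a b) := by unfold Pre_stringsConstruction; infer_instance
def pvWitness_stringsConstruction : String × String := ("ab", "abab")

def Spec_stringsConstruction (a : String) (b : String) (out : Int) : Prop := out = stringsConstruction_alt a b
instance (a : String) (b : String) (out : Int) : Decidable (Spec_stringsConstruction a b out) := by unfold Spec_stringsConstruction; infer_instance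

-- ===== CLAIM (what is proved, stated in full; the proofs are below) =====
def Claim_equal_stringsConstruction : Prop := ∀ (a : String) (b : String), Dom_stringsConstruction a b → Pre_stringsConstruction a b → Spec_stringsConstruction a b (stringsConstruction a b)

-- ===== LEMMAS AND PROOFS =====

-- the common value: min over the distinct chars of a of ⌊count_b c / count_a c⌋
def natMin (al sb : List Char) : Nat :=
  (PySem.List.min? ((PySem.List.dedup al).map (fun c => sb.count c / al.count c)) (fun x => x)).getD 0

-- orientation glue for List.count_erase / List.count_cons (the Mathlib forms test `a == c`)
theorem cntErase (l : List Char) (a c : Char) :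
    (l.erase a).count c = l.count c - (if c = a then 1 else 0) := by
  rw [List.count_erase]
  rcases eq_or_ne a c with h | h
  · subst h; simp
  · simp [h, h.symm]

theorem cntCons (l : List Char) (a c : Char) :
    (a :: l).count c = l.count c + (if c = a then 1 else 0) := by
  rw [List.count_cons]
  rcases eq_or_ne a c with h | h
  · subst h; simp
  · simp [h, h.symm]

theorem passA_success : ∀ (tb sa sb : List Char) (k : Int),
    sa ≠ [] → (∀ c, sa.count c ≤ tb.count c) → (∀ c, sa.count c ≤ sb.count c) →
    ∃ sb', passA tb sa sb k = ([], sb', k + 1, true) ∧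
      (∀ c, sb'.count c = sb.count c - sa.count c) ∧ sb'.length + sa.length = sb.length := by
  intro tb
  induction tb with
  | nil =>
    intro sa sb k hne htb _
    obtain ⟨c, hc⟩ := List.exists_mem_of_ne_nil sa hne
    have h1 := List.one_le_count_iff.mpr hc
    have h2 := htb c
    simp [List.count_nil] at h2
    omega
  | cons s rest ih =>
    intro sa sb k hne htb hsb
    by_cases hc : sa.contains s = true
    · have hmem : s ∈ sa := List.mem_of_elem_eq_true hc
      have hs1 : 1 ≤ sa.count s := List.one_le_count_iff.mpr hmem
      have hsbmem : s ∈ sb := List.one_le_count_iff.mp (le_trans hs1 (hsb s))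
      by_cases he : (sa.erase s).isEmpty = true
      · have hnil : sa.erase s = [] := List.isEmpty_iff.mp he
        have hz : ∀ c, sa.count c = (if c = s then 1 else 0) := by
          intro c
          have := cntErase sa s c
          rw [hnil] at this
          simp at this
          by_cases h : c = s <;> simp [h] at this ⊢ <;> omega
        refine ⟨sb.erase s, by simp [passA, hmem, hnil], ?_, ?_⟩
        · intro c
          have h1 := cntErase sb s c
          have h2 := hz c
          by_cases h : c = s <;> simp [h] at h1 h2 ⊢ <;> omega
        · have h1 := List.length_erase_of_mem hsbmem
          have h2 := List.length_erase_of_mem hmem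
          rw [hnil] at h2
          have h3 : 1 ≤ sa.length := List.length_pos_of_mem hmem
          have h4 : 1 ≤ sb.length := List.length_pos_of_mem hsbmem
          simp at h2
          omega
      · have hne' : sa.erase s ≠ [] := fun h => he (List.isEmpty_iff.mpr h)
        have htb' : ∀ c, (sa.erase s).count c ≤ rest.count c := by
          intro c
          have h1 := htb c
          have h2 := cntErase sa s c
          have h3 := cntCons rest s c
          omega
        have hsb' : ∀ c, (sa.erase s).count c ≤ (sb.erase s).count c := by
          intro c
          have h1 := hsb c
          have h2 := cntErase sa s c
          have h3 := cntErase sb s c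
          omega
        obtain ⟨sb'', heq, hcnt, hlen⟩ := ih (sa.erase s) (sb.erase s) k hne' htb' hsb'
        refine ⟨sb'', by simp [passA, hmem, hne', heq], ?_, ?_⟩
        · intro c
          have h1 := hcnt c
          have h2 := cntErase sa s c
          have h3 := cntErase sb s c
          have h4 := hsb c
          by_cases h : c = s <;> simp [h] at h1 h2 h3 ⊢ <;> omega
        · have h1 := List.length_erase_of_mem hsbmem
          have h2 := List.length_erase_of_mem hmem
          have h3 : 1 ≤ sa.length := List.length_pos_of_mem hmem
          have h4 : 1 ≤ sb.length := List.length_pos_of_mem hsbmem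
          omega
    · have hnot : s ∉ sa := fun h => hc (List.elem_eq_true_of_mem h)
      have hz : sa.count s = 0 := List.count_eq_zero.mpr hnot
      have hie : sa.isEmpty = false := by
        cases h : sa.isEmpty
        · rfl
        · exact absurd (List.isEmpty_iff.mp h) hne
      have htb' : ∀ c, sa.count c ≤ rest.count c := by
        intro c
        have h1 := htb c
        have h3 := cntCons rest s c
        by_cases h : c = s <;> simp [h] at h3 ⊢ <;> omega
      obtain ⟨sb'', heq, hcnt, hlen⟩ := ih sa sb k hne htb' hsb
      exact ⟨sb'', by simp [passA, hnot, hne, heq], hcnt, hlen⟩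

theorem passA_fail : ∀ (tb sa sb : List Char) (k : Int) (c : Char),
    tb.count c < sa.count c →
    (passA tb sa sb k).1 ≠ [] ∧ (passA tb sa sb k).2.2.1 = k := by
  intro tb
  induction tb with
  | nil =>
    intro sa sb k c hlt
    have : sa ≠ [] := by
      intro h; rw [h] at hlt; simp at hlt
    simp [passA, this]
  | cons s rest ih =>
    intro sa sb k c hlt
    have hcc := cntCons rest s c
    by_cases hc : sa.contains s = true
    · have hmem : s ∈ sa := List.mem_of_elem_eq_true hc
      have hlt' : rest.count c < (sa.erase s).count c := by
        have h2 := cntErase sa s c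
        rw [hcc] at hlt
        by_cases h : c = s <;> simp [h] at h2 hlt ⊢ <;> omega
      have hne' : sa.erase s ≠ [] := by
        intro h
        rw [h] at hlt'
        simp at hlt'
      have := ih (sa.erase s) (sb.erase s) k c hlt'
      simpa [passA, hmem, hne'] using this
    · have hlt' : rest.count c < sa.count c := by
        by_cases h : c = s
        · subst h
          have hnm : c ∉ sa := fun hm => hc (List.elem_eq_true_of_mem hm)
          have := List.count_eq_zero.mpr hnm
          omega
        · rw [hcc] at hlt; simp [h] at hlt; omega
      have hnot : s ∉ sa := fun hm => hc (List.elem_eq_true_of_mem hm)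
      have hne : sa ≠ [] := by
        intro h; rw [h] at hlt'; simp at hlt'
      have := ih sa sb k c hlt'
      simpa [passA, hnot, hne] using this

-- min of a (+1)-shifted Nat list is the min plus one
theorem foldl_min_shift : ∀ (v : List Nat) (a : Nat),
    (v.map (fun n => n + 1)).foldl min (a + 1) = v.foldl min a + 1 := by
  intro v
  induction v with
  | nil => intro a; simp
  | cons b w ih =>
    intro a
    have : min (a + 1) (b + 1) = min a b + 1 := by omega
    simp only [List.map_cons, List.foldl_cons, this, ih]

-- casting a Nat list to Int commutes with the running min
theorem foldl_min_cast : ∀ (v : List Nat) (a : Nat),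
    (v.map Nat.cast).foldl min ((a : Int)) = ((v.foldl min a : Nat) : Int) := by
  intro v
  induction v with
  | nil => intro a; simp
  | cons b w ih =>
    intro a
    simp only [List.map_cons, List.foldl_cons]
    rw [← Nat.cast_min, ih]

theorem natMin_zero (al sb : List Char) (c : Char) (hc : c ∈ al)
    (hlt : sb.count c < al.count c) : natMin al sb = 0 := by
  have hcd : c ∈ PySem.List.dedup al := (PySem.List.mem_dedup _ _).mpr hc
  have hval : sb.count c / al.count c = 0 := Nat.div_eq_of_lt hlt
  have hmm : (0 : Nat) ∈ (PySem.List.dedup al).map (fun c => sb.count c / al.count c) := by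
    rw [← hval]; exact List.mem_map_of_mem hcd
  unfold natMin
  cases hm : PySem.List.min? ((PySem.List.dedup al).map (fun c => sb.count c / al.count c)) (fun x => x) with
  | none => simp
  | some m =>
    have := PySem.List.min?_isMin hm 0 hmm
    simp at this ⊢
    omega

theorem natMin_succ (al sb sb' : List Char) (hne : al ≠ [])
    (hall : ∀ c ∈ al, al.count c ≤ sb.count c)
    (hcnt : ∀ c, sb'.count c = sb.count c - al.count c) :
    natMin al sb = natMin al sb' + 1 := by
  have hmapeq : (PySem.List.dedup al).map (fun c => sb.count c / al.count c)
      = ((PySem.List.dedup al).map (fun c => sb'.count c / al.count c)).map (fun n => n + 1) := by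
    rw [List.map_map]
    apply List.map_congr_left
    intro c hcmem
    have hcal : c ∈ al := (PySem.List.mem_dedup _ _).mp hcmem
    have hd : 1 ≤ al.count c := List.one_le_count_iff.mpr hcal
    have hle := hall c hcal
    have h1 := hcnt c
    have h2 : sb.count c = sb'.count c + al.count c := by omega
    simp only [Function.comp]
    rw [h2, Nat.add_div_right _ (by omega)]
  obtain ⟨c, hcmem⟩ := List.exists_mem_of_ne_nil al hne
  have hdne : PySem.List.dedup al ≠ [] := by
    intro h
    have := (PySem.List.mem_dedup al c).mpr hcmem
    rw [h] at this
    simp at this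
  obtain ⟨x, t, hxt⟩ := List.exists_cons_of_ne_nil hdne
  unfold natMin
  rw [hmapeq, hxt]
  simp only [List.map_cons, PySem.List.min?_id_cons, Option.getD_some]
  exact foldl_min_shift _ _

theorem loopA_eq : ∀ (fuel : Nat) (al sb : List Char) (k : Int),
    al ≠ [] → sb.length < fuel → loopA al fuel sb k = k + (natMin al sb : Int) := by
  intro fuel
  induction fuel with
  | zero => intro al sb k _ h; omega
  | succ fuel ih =>
    intro al sb k hne hlt
    by_cases hall : ∀ c ∈ al, al.count c ≤ sb.count c
    · have hall' : ∀ c, al.count c ≤ sb.count c := by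
        intro c
        by_cases h : c ∈ al
        · exact hall c h
        · rw [List.count_eq_zero.mpr h]; omega
      obtain ⟨sb', heq, hcnt, hlen⟩ := passA_success sb al sb k hne hall' hall'
      have hlp : 1 ≤ al.length := by
        obtain ⟨c, hc⟩ := List.exists_mem_of_ne_nil al hne
        exact List.length_pos_of_mem hc
      have hlt' : sb'.length < fuel := by omega
      have := ih al sb' (k + 1) hne hlt'
      rw [natMin_succ al sb sb' hne hall hcnt]
      simp only [loopA, heq]
      norm_num
      rw [this]
      ring
    · push Not at hall
      obtain ⟨c, hcmem, hclt⟩ := hall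
      obtain ⟨h1, h2⟩ := passA_fail sb al sb k c hclt
      have h3 : 0 < (passA sb al sb k).1.length := List.length_pos_of_ne_nil h1
      rw [natMin_zero al sb c hcmem hclt]
      simp only [loopA]
      rw [if_pos h3, h2]
      simp

theorem alt_eq_natMin (a b : String) (h : a.toList ≠ []) :
    stringsConstruction_alt a b = (natMin a.toList b.toList : Int) := by
  simp only [stringsConstruction_alt]
  rw [PySem.Dict.foldl_insert_getD_add_one_eq_counter, PySem.Dict.foldl_insert_getD_add_one_eq_counter,
      PySem.Dict.items_counter]
  have hmap : ((PySem.Set.ofList a.toList).map (fun k => (k, (a.toList.count k : Int)))).map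
      (fun p => PySem.Int.floordiv ((PySem.Dict.counter b.toList).getD p.1 0) p.2)
      = ((PySem.List.dedup a.toList).map (fun c => b.toList.count c / a.toList.count c)).map
          Nat.cast := by
    rw [List.map_map, ← PySem.List.dedup_eq_ofList, List.map_map]
    apply List.map_congr_left
    intro c _
    simp only [Function.comp]
    rw [PySem.Dict.getD_counter]
    exact_mod_cast PySem.Int.floordiv_natCast (b.toList.count c) (a.toList.count c)
  rw [hmap]
  have hdne : PySem.List.dedup a.toList ≠ [] := by
    obtain ⟨c, hc⟩ := List.exists_mem_of_ne_nil _ h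
    intro hcontra
    have := (PySem.List.mem_dedup a.toList c).mpr hc
    rw [hcontra] at this
    simp at this
  obtain ⟨x, t, hxt⟩ := List.exists_cons_of_ne_nil hdne
  unfold natMin
  rw [hxt]
  simp only [List.map_cons, PySem.List.min?_id_cons, Option.getD_some]
  exact foldl_min_cast _ _

-- ===== VERDICT (by name: the statement is the Claim_ definition above) =====
theorem stringsConstruction_spec : Claim_equal_stringsConstruction := by
  intro a b _ hpre
  have h : a.toList ≠ [] := fun hn => hpre (String.toList_eq_nil_iff.mp hn)
  unfold Spec_stringsConstruction stringsConstruction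
  rw [loopA_eq _ _ _ _ h (Nat.lt_succ_self _), alt_eq_natMin a b h, zero_add]
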